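-- pv_equiv track=rewrite | github.com/CruzAllSystems/Computer-Privacy | RC4 Cipher/HW02_cchavez4.py | encryptOtp
-- ===== SOURCE A (Python) =====
-- def encryptOtp(encryptionKey,plainText):
--     plainTextAscii = [] #Ascii values of paintext characters
--     keyAscii = [] #Ascii values of key characters
--     cipherTextAscii = [] #Ascii values of ciphertext characters
--     cipherText = '' #CipherText to be output
--     index = 0 #Variables innitialized to enact one-time pad encryption. Like ingredients to a recipe.
--
--     if len(encryptionKey) != len(plainText): #Checks key is valid for plainText
--         return "Message and key are not the same length!"
--     else: #Algorithim to populate lists with appropriate Ascii values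
--         for c in plainText:
--             asciiC = ord(c)
--             plainTextAscii.append(asciiC)
--         for c in encryptionKey:
--             asciiKey = ord(c)
--             keyAscii.append(asciiKey)
--         for val in plainTextAscii: #Encryption algorithim. Xor's values in key and plaintext lists
--             asciiCipher = val ^ keyAscii[index]
--             cipherTextAscii.append(asciiCipher) #Populates ciphertext list with appropraite Ascii values
--             index += 1
--
--         for val in cipherTextAscii: #Converts Ascii to cipherText String
--             cipherText += chr(val)
--
--     return cipherText
-- ===== SOURCE B (Python) =====
-- def encryptOtp(encryptionKey, plainText):
--     if len(encryptionKey) != len(plainText):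
--         return "Message and key are not the same length!"
--     return ''.join(chr(ord(p) ^ ord(k)) for p, k in zip(plainText, encryptionKey))
-- ===== Notes on version B (the rewrite author's own statement) =====
-- stated objective: simpler
-- what changed: Collapses A's four loops and three intermediate ASCII lists (plaintext ords, key ords, indexed XOR pass, chr-concatenation pass) into a single zip pass that XORs each character pair and joins the chr results directly.
import Mathlib
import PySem

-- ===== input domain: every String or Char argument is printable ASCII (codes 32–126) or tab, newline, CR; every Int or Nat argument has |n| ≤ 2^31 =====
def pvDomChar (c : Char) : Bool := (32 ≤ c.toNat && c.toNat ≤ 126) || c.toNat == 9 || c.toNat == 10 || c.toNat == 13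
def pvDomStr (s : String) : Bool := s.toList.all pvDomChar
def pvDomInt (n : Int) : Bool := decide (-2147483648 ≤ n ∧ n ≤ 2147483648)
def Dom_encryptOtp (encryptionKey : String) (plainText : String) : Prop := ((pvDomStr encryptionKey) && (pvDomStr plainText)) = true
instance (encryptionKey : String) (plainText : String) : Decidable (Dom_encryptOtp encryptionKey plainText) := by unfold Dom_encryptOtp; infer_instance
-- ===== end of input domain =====

-- B replaces A's four loops and three intermediate lists by one zip-XOR-join pass (simpler, same behaviour).

-- ===== PORT A =====
def encryptOtp (encryptionKey : String) (plainText : String) : String :=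
  if encryptionKey.length ≠ plainText.length then
    "Message and key are not the same length!"
  else
    let plainTextAscii : List Nat :=
      plainText.toList.foldl (fun acc c => acc ++ [c.toNat]) []
    let keyAscii : List Nat :=
      encryptionKey.toList.foldl (fun acc c => acc ++ [c.toNat]) []
    -- keyAscii[index]: index is always in range here (lengths equal), so getD's default is never used
    let st := plainTextAscii.foldl
      (fun (st : List Nat × Nat) val => (st.1 ++ [val ^^^ keyAscii.getD st.2 0], st.2 + 1))
      ([], 0)
    st.1.foldl (fun ct v => ct ++ String.singleton (Char.ofNat v)) ""

-- ===== PORT B =====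
def encryptOtp_alt (encryptionKey : String) (plainText : String) : String :=
  if encryptionKey.length ≠ plainText.length then
    "Message and key are not the same length!"
  else
    String.ofList ((plainText.toList.zip encryptionKey.toList).map
      (fun pk => Char.ofNat (pk.1.toNat ^^^ pk.2.toNat)))

-- ===== PRECONDITION & SPEC =====
def Spec_encryptOtp (encryptionKey : String) (plainText : String) (out : String) : Prop := out = encryptOtp_alt encryptionKey plainText
instance (encryptionKey : String) (plainText : String) (out : String) : Decidable (Spec_encryptOtp encryptionKey plainText out) := by unfold Spec_encryptOtp; infer_instance

-- ===== CLAIM (what is proved, stated in full; the proofs are below) =====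
def Claim_equal_encryptOtp : Prop := ∀ (encryptionKey : String) (plainText : String), Dom_encryptOtp encryptionKey plainText → Spec_encryptOtp encryptionKey plainText (encryptOtp encryptionKey plainText)

-- ===== LEMMAS AND PROOFS =====

theorem foldl_ord (l : List Char) (acc : List Nat) :
    l.foldl (fun acc c => acc ++ [c.toNat]) acc = acc ++ l.map Char.toNat := by
  induction l generalizing acc with
  | nil => simp
  | cons c l ih => simp [List.foldl_cons, ih]

theorem foldl_xor (p kA : List Nat) (acc : List Nat) (i : Nat)
    (h : i + p.length ≤ kA.length) :
    (p.foldl (fun (st : List Nat × Nat) val => (st.1 ++ [val ^^^ kA.getD st.2 0], st.2 + 1))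
      (acc, i)).1 = acc ++ p.zipWith (· ^^^ ·) (kA.drop i) := by
  induction p generalizing acc i with
  | nil => simp
  | cons v p ih =>
    have hi : i < kA.length := by simp at h; omega
    have hd : kA.drop i = kA[i] :: kA.drop (i + 1) := List.drop_eq_getElem_cons hi
    simp only [List.foldl_cons]
    rw [ih (acc ++ [v ^^^ kA.getD i 0]) (i + 1) (by simp at h ⊢; omega)]
    rw [hd, List.zipWith_cons_cons]
    simp [List.getD, List.getElem?_eq_getElem hi]

theorem foldl_chr (l : List Nat) (s : String) :
    l.foldl (fun ct v => ct ++ String.singleton (Char.ofNat v)) s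
      = s ++ String.ofList (l.map Char.ofNat) := by
  induction l generalizing s with
  | nil =>
    simp [List.foldl_nil]
  | cons v l ih =>
    rw [List.foldl_cons, ih]
    apply String.toList_inj.mp
    simp

-- ===== VERDICT (by name: the statement is the Claim_ definition above) =====
theorem encryptOtp_spec : Claim_equal_encryptOtp := by
  unfold Claim_equal_encryptOtp
  intro k p _
  unfold Spec_encryptOtp encryptOtp encryptOtp_alt
  by_cases hlen : k.length ≠ p.length
  · simp [hlen]
  · push_neg at hlen
    simp only [hlen, ne_eq, not_true_eq_false, if_false]
    rw [foldl_ord, foldl_ord]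
    simp only [List.nil_append]
    have hlen' : p.toList.length = k.toList.length := by
      have h1 : k.toList.length = k.length := by simp
      have h2 : p.toList.length = p.length := by simp
      omega
    have hle : 0 + (p.toList.map Char.toNat).length ≤ (k.toList.map Char.toNat).length := by
      simp [hlen']
    rw [foldl_xor _ _ _ _ hle, foldl_chr]
    apply String.toList_inj.mp
    simp [List.zipWith_map, List.zip_eq_zipWith, List.map_zipWith]
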